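-- pv_equiv track=rewrite | github.com/leideng/CANN-8.1.RC1 | Ascend/ascend-toolkit/8.1.RC1/opp/built-in/op_impl/ai_core/tbe/impl/strided_slice_d.py | _get_align_axis
-- ===== SOURCE A (Python) =====
-- def _get_align_axis(out_shape):
--     """
--     get the axis_info when applying the align
--     """
--     flag = -1
--     if out_shape[-1] != 1:
--         axis = len(out_shape) - 2
--     else:
--         for i, item in enumerate(reversed(out_shape)):
--             if item > 1:
--                 # the first dim greater than 1 in reverse order
--                 flag = i
--                 break
--         if flag in (-1, 0):
--             axis = 0
--         else:
--             axis = len(out_shape) - flag - 1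
--
--     return axis
-- ===== SOURCE B (Python) =====
-- def _get_align_axis(out_shape):
--     if out_shape[-1] != 1:
--         return len(out_shape) - 2
--     idx = [i for i, v in enumerate(out_shape) if v > 1]
--     return idx[-1] if idx else 0
-- ===== Notes on version B (the rewrite author's own statement) =====
-- stated objective: simpler
-- what changed: Replaced the reverse early-break scan with flag bookkeeping and reverse-to-forward index conversion by one forward pass collecting indices of dims > 1 and taking the last collected index (0 if none).
import Mathlib
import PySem

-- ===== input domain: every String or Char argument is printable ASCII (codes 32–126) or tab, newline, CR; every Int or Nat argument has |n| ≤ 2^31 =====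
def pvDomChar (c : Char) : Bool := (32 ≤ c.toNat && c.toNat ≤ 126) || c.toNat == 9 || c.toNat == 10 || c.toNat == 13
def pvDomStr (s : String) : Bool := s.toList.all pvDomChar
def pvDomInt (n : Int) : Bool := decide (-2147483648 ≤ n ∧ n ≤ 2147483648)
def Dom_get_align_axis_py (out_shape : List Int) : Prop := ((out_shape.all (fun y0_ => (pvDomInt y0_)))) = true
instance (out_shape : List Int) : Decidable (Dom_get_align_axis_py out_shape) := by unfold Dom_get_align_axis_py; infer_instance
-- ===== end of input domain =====

-- B replaces A's reverse early-break scan (flag bookkeeping + reverse-to-forward index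
-- conversion) by one forward pass collecting the indices of dims > 1 and taking the last
-- collected index (0 if none); objective: simpler.

-- ===== PORT A =====
-- the for-loop over enumerate(reversed(out_shape)) with break: returns flag
def pvLoopA : List Int → Int → Int → Int
  | [], _, flag => flag
  | item :: rest, i, flag => if item > 1 then i else pvLoopA rest (i + 1) flag

def get_align_axis_py (out_shape : List Int) : Int :=
  let flag : Int := -1
  match PySem.List.pyGet? out_shape (-1) with
  | none => 0   -- IndexError on the empty list: excluded by Pre_
  | some last =>
    if last ≠ 1 then (out_shape.length : Int) - 2
    else
      let flag := pvLoopA out_shape.reverse 0 flag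
      if flag = -1 ∨ flag = 0 then 0
      else (out_shape.length : Int) - flag - 1

-- ===== PORT B =====
-- the comprehension [i for i, v in enumerate(out_shape) if v > 1]
def pvIdxB : List Int → Nat → List Int
  | [], _ => []
  | v :: rest, i => (if v > 1 then [(i : Int)] else []) ++ pvIdxB rest (i + 1)

def get_align_axis_py_alt (out_shape : List Int) : Int :=
  match PySem.List.pyGet? out_shape (-1) with
  | none => 0   -- IndexError on the empty list: excluded by Pre_
  | some last =>
    if last ≠ 1 then (out_shape.length : Int) - 2
    else
      match (pvIdxB out_shape 0).getLast? with
      | some j => j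
      | none => 0

-- ===== PRECONDITION & SPEC =====
-- Pre_ excludes only the empty list, on which A (and B) raise IndexError at out_shape[-1].
def Pre_get_align_axis_py (out_shape : List Int) : Prop := out_shape ≠ []
instance (out_shape : List Int) : Decidable (Pre_get_align_axis_py out_shape) := by unfold Pre_get_align_axis_py; infer_instance
def pvWitness_get_align_axis_py : List Int := [2, 3, 1]

def Spec_get_align_axis_py (out_shape : List Int) (out : Int) : Prop := out = get_align_axis_py_alt out_shape
instance (out_shape : List Int) (out : Int) : Decidable (Spec_get_align_axis_py out_shape out) := by unfold Spec_get_align_axis_py; infer_instance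

-- ===== CLAIM (what is proved, stated in full; the proofs are below) =====
def Claim_equal_get_align_axis_py : Prop := ∀ (out_shape : List Int), Dom_get_align_axis_py out_shape → Pre_get_align_axis_py out_shape → Spec_get_align_axis_py out_shape (get_align_axis_py out_shape)

-- ===== LEMMAS AND PROOFS =====

-- A's reverse scan returns i plus the first index whose value exceeds one, else the initial flag.
theorem pvLoopA_eq (r : List Int) : ∀ (i : Int),
    pvLoopA r i (-1) =
      match r.findIdx? (fun x => decide (x > 1)) with
      | none => -1
      | some j => i + (j : Int) := by
  induction r with
  | nil => intro i; simp [pvLoopA]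
  | cons x xs ih =>
    intro i
    rw [pvLoopA, List.findIdx?_cons]
    by_cases hx : x > 1
    · simp [hx]
    · simp only [hx, decide_false, if_false, ih]
      cases h : xs.findIdx? (fun x => decide (x > 1)) with
      | none => simp
      | some j => simp only [Option.map_some]; push_cast; ring

-- B's collected index list: its last element is the forward position of the
-- first value > 1 in the reversed list.
theorem pvIdxB_getLast? (l : List Int) : ∀ (n : Nat),
    (pvIdxB l n).getLast? =
      (l.reverse.findIdx? (fun x => decide (x > 1))).map
        (fun j => ((n + (l.length - 1 - j) : Nat) : Int)) := by
  induction l with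
  | nil => intro n; simp [pvIdxB]
  | cons v rest ih =>
    intro n
    rw [pvIdxB, List.getLast?_append]
    simp only [List.reverse_cons, List.findIdx?_append, ih (n + 1)]
    cases h : rest.reverse.findIdx? (fun x => decide (x > 1)) with
    | some j =>
      have hj : j < rest.length := by
        have := List.findIdx?_eq_some_iff_findIdx_eq.mp h
        simp at this; omega
      simp only [Option.map_some, Option.some_or]
      congr 1
      simp only [List.length_cons]
      omega
    | none =>
      simp only [Option.map_none, Option.none_or]
      by_cases hv : v > 1
      · simp [hv, List.findIdx?_cons]
      · simp [hv, List.findIdx?_cons]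

theorem pyGet_neg_one (l : List Int) (h : l ≠ []) :
    PySem.List.pyGet? l (-1) = l.getLast? := by
  cases l with
  | nil => exact absurd rfl h
  | cons x xs =>
    simp [PySem.List.pyGet?, PySem.List.pyIdx?, List.getLast?_eq_getElem?]

-- ===== VERDICT (by name: the statement is the Claim_ definition above) =====
theorem get_align_axis_py_spec : Claim_equal_get_align_axis_py := by
  intro l _ hpre
  unfold Spec_get_align_axis_py get_align_axis_py get_align_axis_py_alt
  rw [pyGet_neg_one l hpre]
  obtain ⟨a, t, hr⟩ : ∃ a t, l.reverse = a :: t := by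
    cases hrev : l.reverse with
    | nil => exact absurd (by simpa using congrArg List.reverse hrev) hpre
    | cons a t => exact ⟨a, t, rfl⟩
  have hlast : l.getLast? = some a := by
    rw [← List.head?_reverse, hr]; rfl
  have hlen : l.length = t.length + 1 := by
    have := congrArg List.length hr; simpa using this
  rw [hlast]
  by_cases ha : a ≠ 1
  · simp [ha]
  · push Not at ha
    subst ha
    simp only [ne_eq, not_true_eq_false, if_false]
    rw [pvLoopA_eq, pvIdxB_getLast?, hr, List.findIdx?_cons]
    simp only [show (fun x => decide (x > 1)) (1 : Int) = false from rfl,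
      Bool.false_eq_true, if_false]
    cases h : t.findIdx? (fun x => decide (x > 1)) with
    | none => simp
    | some j =>
      have hj : j < t.length := by
        have := List.findIdx?_eq_some_iff_findIdx_eq.mp h
        omega
      simp only [Option.map_some, zero_add]
      have go : (↑l.length : ℤ) - ↑(j + 1) - 1 = (↑(l.length - 1 - (j + 1)) : ℤ) := by omega
      have hne : ¬((↑(j + 1) : ℤ) = -1 ∨ (↑(j + 1) : ℤ) = 0) := by omega
      rw [if_neg hne]
      exact go
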